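-- pv_equiv track=rewrite | github.com/mmiguel6288code/sourcetools | src/sourcetools/astoid.py | iterate_with_siblings
-- ===== SOURCE A (Python) =====
-- def iterate_with_siblings(iterable):
--     """
--     Yields triplets of an item with its adjacent siblings
--     First item's previous sibling is None
--     Last item's next sibling is None
--     """
--     prev_sibling = None
--     curr_sibling = None
--     items = list(iterable)
--     for next_sibling in items:
--         if curr_sibling is not None:
--             yield (prev_sibling,curr_sibling,next_sibling)
--         prev_sibling = curr_sibling
--         curr_sibling = next_sibling
--     if curr_sibling is not None:
--         next_sibling = None
--         yield (prev_sibling,curr_sibling,next_sibling)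
-- ===== SOURCE B (Python) =====
-- def iterate_with_siblings(iterable):
--     """
--     Yields triplets of an item with its adjacent siblings
--     First item's previous sibling is None
--     Last item's next sibling is None
--     """
--     items = list(iterable)
--     prevs = [None] + items[:-1]
--     nexts = items[1:] + [None]
--     yield from zip(prevs, items, nexts)
-- ===== Notes on version B (the rewrite author's own statement) =====
-- stated objective: idiomatic
-- what changed: Replaced the rolling prev/curr/next state machine with the standard zip-of-shifted-lists idiom: build the prev and next sequences once by slicing and padding, then zip the three lists together.
import Mathlib
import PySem

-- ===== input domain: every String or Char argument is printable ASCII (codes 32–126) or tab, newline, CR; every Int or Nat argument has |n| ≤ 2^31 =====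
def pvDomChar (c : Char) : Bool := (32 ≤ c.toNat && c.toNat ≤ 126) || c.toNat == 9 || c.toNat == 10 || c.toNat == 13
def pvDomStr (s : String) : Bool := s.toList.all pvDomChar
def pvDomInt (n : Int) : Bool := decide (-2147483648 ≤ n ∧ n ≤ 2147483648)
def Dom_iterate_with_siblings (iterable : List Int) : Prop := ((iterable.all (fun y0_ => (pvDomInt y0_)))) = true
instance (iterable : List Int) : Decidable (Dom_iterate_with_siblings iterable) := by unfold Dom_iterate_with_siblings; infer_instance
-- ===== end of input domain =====

-- B replaces A's rolling prev/curr/next state machine with the zip-of-shifted-lists idiom (idiomatic, same cost).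

-- ===== PORT A =====
-- A's loop carries (prev_sibling, curr_sibling) as Option state; curr = none only before
-- the first element (list elements are Int, never Python None), exactly as in the source.
def iterateWithSiblingsLoop (prev curr : Option Int) : List Int → List (Option Int × Int × Option Int)
  | [] =>
      match curr with
      | some c => [(prev, c, none)]
      | none => []
  | next :: rest =>
      (match curr with
       | some c => [(prev, c, some next)]
       | none => []) ++ iterateWithSiblingsLoop curr (some next) rest

def iterate_with_siblings (iterable : List Int) : List (Option Int × Int × Option Int) :=
  iterateWithSiblingsLoop none none iterable

-- ===== PORT B =====
-- prevs = [None] + items[:-1]; nexts = items[1:] + [None]; zip(prevs, items, nexts)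
def iterate_with_siblings_alt (iterable : List Int) : List (Option Int × Int × Option Int) :=
  let prevs : List (Option Int) := none :: iterable.dropLast.map some
  let nexts : List (Option Int) := (iterable.drop 1).map some ++ [none]
  prevs.zip (iterable.zip nexts)

-- ===== PRECONDITION & SPEC =====
def Spec_iterate_with_siblings (iterable : List Int) (out : List (Option Int × Int × Option Int)) : Prop := out = iterate_with_siblings_alt iterable
instance (iterable : List Int) (out : List (Option Int × Int × Option Int)) : Decidable (Spec_iterate_with_siblings iterable out) := by unfold Spec_iterate_with_siblings; infer_instance

-- ===== CLAIM (what is proved, stated in full; the proofs are below) =====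
def Claim_equal_iterate_with_siblings : Prop := ∀ (iterable : List Int), Dom_iterate_with_siblings iterable → Spec_iterate_with_siblings iterable (iterate_with_siblings iterable)

-- ===== LEMMAS AND PROOFS =====

-- A's loop, started with curr = some c and virtual predecessor p, equals the zip of the
-- three shifted lists for c :: xs (with p in place of the leading none).
theorem iterateWithSiblingsLoop_zip (xs : List Int) : ∀ (p : Option Int) (c : Int),
    iterateWithSiblingsLoop p (some c) xs =
      (p :: (c :: xs).dropLast.map some).zip ((c :: xs).zip (xs.map some ++ [none])) := by
  induction xs with
  | nil => intro p c; simp [iterateWithSiblingsLoop]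
  | cons y rs ih =>
      intro p c
      simp only [iterateWithSiblingsLoop, List.singleton_append]
      rw [ih (some c) y]
      simp [List.zip]

theorem iterate_with_siblings_spec : Claim_equal_iterate_with_siblings := by
  intro iterable _
  unfold Spec_iterate_with_siblings iterate_with_siblings iterate_with_siblings_alt
  cases iterable with
  | nil => simp [iterateWithSiblingsLoop]
  | cons x rest =>
      show iterateWithSiblingsLoop none (some x) rest = _
      rw [iterateWithSiblingsLoop_zip]
      simp
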